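-- pv_equiv track=rewrite | github.com/pypi-data/pypi-mirror-314 | packages/py-hangul-utils/py_hangul_utils-1.0.0.tar.gz/py_hangul_utils-1.0.0/hangul_utils/utils.py | chunk_at_end
-- ===== SOURCE A (Python) =====
-- from typing import Any, Dict, List, Union
--
-- def chunk_at_end(value: str = "", n: int = 1) -> List[str]:
--     """문자열을 뒤에서부터 n개씩 자름"""
--     result = []
--     start = len(value)
--
--     while (start := start - n) > 0:
--         result.append(value[start : start + n])
--
--     if start > -n:
--         result.append(value[: start + n])
--
--     return result
-- ===== SOURCE B (Python) =====
-- def chunk_at_end(value: str = "", n: int = 1):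
--     """문자열을 뒤에서부터 n개씩 자름"""
--     if not value:
--         return []
--     chunks = []
--     r = len(value) % n
--     if r:
--         chunks.append(value[:r])
--     for i in range(r, len(value), n):
--         chunks.append(value[i:i+n])
--     chunks.reverse()
--     return chunks
-- ===== Notes on version B (the rewrite author's own statement) =====
-- stated objective: alternative
-- what changed: Replaces A's descending while-loop plus trailing-if by a forward pass (leading remainder piece computed with %, then fixed-stride slices) followed by a single reverse.
import Mathlib
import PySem

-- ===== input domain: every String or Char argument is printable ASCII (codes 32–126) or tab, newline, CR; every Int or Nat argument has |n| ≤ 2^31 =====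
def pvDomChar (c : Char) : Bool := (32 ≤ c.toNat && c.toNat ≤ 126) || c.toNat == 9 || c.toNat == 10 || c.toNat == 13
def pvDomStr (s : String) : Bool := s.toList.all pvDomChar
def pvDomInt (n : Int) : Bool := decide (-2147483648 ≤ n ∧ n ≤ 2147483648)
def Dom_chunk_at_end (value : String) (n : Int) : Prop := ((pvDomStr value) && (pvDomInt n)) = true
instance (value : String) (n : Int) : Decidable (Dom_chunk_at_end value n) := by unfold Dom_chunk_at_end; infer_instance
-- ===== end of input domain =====

-- B chunks front-to-back (leading remainder piece, then stride-n slices) and reverses once,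
-- instead of A's descending while-loop with a trailing if; same cost, different decomposition.

-- ===== PORT A =====
-- A's while loop: start := start - n each step while start > 0; the fuel only makes the
-- recursion total (within Pre_ the loop makes at most len(value) steps, so len+1 is enough).
def chunkA_loop (fuel : Nat) (chars : List Char) (start n : Int) (result : List String) :
    Int × List String :=
  match fuel with
  | 0 => (start, result)
  | fuel + 1 =>
    let start' := start - n
    if start' > 0 then
      chunkA_loop fuel chars start' n
        (result ++ [String.ofList (PySem.List.slice chars (some start') (some (start' + n)))])
    else (start', result)

def chunk_at_end (value : String) (n : Int) : List String :=
  let chars := value.toList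
  let p := chunkA_loop (chars.length + 1) chars (chars.length : Int) n []
  if p.1 > -n then p.2 ++ [String.ofList (PySem.List.slice chars none (some (p.1 + n)))]
  else p.2

-- ===== PORT B =====
-- B's for-loop over range(r, len, n): append value[i:i+n], advance i by n (fuel as above).
def chunkB_loop (fuel : Nat) (chars : List Char) (i n : Int) (acc : List String) :
    List String :=
  match fuel with
  | 0 => acc
  | fuel + 1 =>
    if i < (chars.length : Int) then
      chunkB_loop fuel chars (i + n) n
        (acc ++ [String.ofList (PySem.List.slice chars (some i) (some (i + n)))])
    else acc

def chunk_at_end_alt (value : String) (n : Int) : List String :=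
  let chars := value.toList
  if chars.isEmpty then []
  else
    let r := PySem.Int.mod (chars.length : Int) n
    let chunks := if r ≠ 0 then [String.ofList (PySem.List.slice chars none (some r))] else []
    (chunkB_loop (chars.length + 1) chars r n chunks).reverse

-- ===== PRECONDITION & SPEC =====
-- Pre_ excludes exactly the inputs on which Python A never terminates (no value is returned
-- there): n ≤ 0 with a non-empty value, and n < 0 even with the empty value.
def Pre_chunk_at_end (value : String) (n : Int) : Prop := 1 ≤ n ∨ (value = "" ∧ 0 ≤ n)
instance (value : String) (n : Int) : Decidable (Pre_chunk_at_end value n) := by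
  unfold Pre_chunk_at_end; infer_instance

def pvWitness_chunk_at_end : String × Int := ("abcdefg", 3)

def Spec_chunk_at_end (value : String) (n : Int) (out : List String) : Prop :=
  out = chunk_at_end_alt value n
instance (value : String) (n : Int) (out : List String) :
    Decidable (Spec_chunk_at_end value n out) := by unfold Spec_chunk_at_end; infer_instance

-- ===== CLAIM (what is proved, stated in full; the proofs are below) =====
def Claim_equal_chunk_at_end : Prop := ∀ (value : String) (n : Int),
  Dom_chunk_at_end value n → Pre_chunk_at_end value n →
  Spec_chunk_at_end value n (chunk_at_end value n)

-- ===== LEMMAS AND PROOFS =====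

-- canonical end-first chunk list of the length-m prefix (the common reference of both ports);
-- `max n 1` only makes the recursion total: every use below has 1 ≤ n, where it IS n.
def chunksRef (chars : List Char) (n : Nat) : Nat → List String
  | m =>
    if _h0 : m = 0 then []
    else if _h1 : m ≤ n then [String.ofList (chars.take m)]
    else
      String.ofList ((chars.drop (m - n)).take n) :: chunksRef chars n (m - max n 1)
  termination_by m => m
  decreasing_by omega

theorem chunkA_loop_spec (chars : List Char) (n' : Nat) (hn : 1 ≤ n') :
    ∀ (m : Nat) (fuel : Nat), m < fuel → ∀ (result : List String),
    (if (chunkA_loop fuel chars (m : Int) (n' : Int) result).1 > -(n' : Int) then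
       (chunkA_loop fuel chars (m : Int) (n' : Int) result).2 ++
         [String.ofList (PySem.List.slice chars none
           (some ((chunkA_loop fuel chars (m : Int) (n' : Int) result).1 + (n' : Int))))]
     else (chunkA_loop fuel chars (m : Int) (n' : Int) result).2)
    = result ++ chunksRef chars n' m := by
  intro m
  induction m using Nat.strong_induction_on with
  | _ m ih =>
    intro fuel hfuel result
    rcases Nat.lt_or_ge n' m with hlt | hge
    · -- (m:Int) - n' > 0 : the loop takes a step
      obtain ⟨f, rfl⟩ : ∃ f, fuel = f + 1 := ⟨fuel - 1, by omega⟩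
      have hstep : ((m : Int) - n') > 0 := by omega
      have hcast : (m : Int) - n' = ((m - n' : Nat) : Int) := by omega
      simp only [chunkA_loop, hstep, if_pos]
      have hrec := ih (m - n') (by omega) f (by omega)
        (result ++ [String.ofList (PySem.List.slice chars (some ((m:Int) - n'))
          (some ((m:Int) - n' + n')))])
      rw [hcast] at hrec ⊢
      rw [PySem.List.slice_natCast_add] at hrec ⊢
      rw [hrec]
      have h0 : ¬ m = 0 := by omega
      have h1 : ¬ m ≤ n' := by omega
      have h2 : m - max n' 1 = m - n' := by omega
      conv_rhs => rw [chunksRef]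
      simp [h0, h1, h2]
    · -- (m:Int) - n' ≤ 0 : the loop exits immediately
      have hstep : ¬ (((m : Int) - n') > 0) := by omega
      obtain ⟨f, rfl⟩ : ∃ f, fuel = f + 1 := ⟨fuel - 1, by omega⟩
      simp only [chunkA_loop, hstep, if_false]
      rw [chunksRef]
      by_cases hm0 : m = 0
      · subst hm0
        simp
      · have hmpos : (0 : Int) < m := by exact_mod_cast Nat.pos_of_ne_zero hm0
        have hpos : ((m : Int) - n') > -(n' : Int) := by omega
        have hsum : (m : Int) - n' + n' = (m : Int) := by ring
        simp only [hpos, if_pos, hsum, dif_neg hm0, dif_pos hge]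
        rw [PySem.List.slice_to_natCast]

-- the forward stride-n chunks that chunkB_loop appends, indexed by chunk count
def strideChunks (chars : List Char) (n : Nat) : Nat → Nat → List String
  | _, 0 => []
  | i, j + 1 =>
    String.ofList ((chars.drop i).take n) :: strideChunks chars n (i + n) j

theorem chunkB_loop_spec (chars : List Char) (n' : Nat) (hn : 1 ≤ n') :
    ∀ (j i : Nat), i + j * n' = chars.length → ∀ (fuel : Nat), j ≤ fuel →
    ∀ (acc : List String),
    chunkB_loop fuel chars (i : Int) (n' : Int) acc = acc ++ strideChunks chars n' i j := by
  intro j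
  induction j with
  | zero =>
    intro i hlen fuel _ acc
    have hi : i = chars.length := by simpa using hlen
    have hge : ¬ ((i : Int) < (chars.length : Int)) := by omega
    cases fuel <;> simp [chunkB_loop, hge, strideChunks]
  | succ j ih =>
    intro i hlen fuel hfuel acc
    have hexp : (j + 1) * n' = n' + j * n' := by ring
    rw [hexp] at hlen
    obtain ⟨f, rfl⟩ : ∃ f, fuel = f + 1 := ⟨fuel - 1, by omega⟩
    have hlt : (i : Int) < (chars.length : Int) := by omega
    simp only [chunkB_loop, hlt, if_pos]
    have hcast : (i : Int) + (n' : Int) = ((i + n' : Nat) : Int) := by push_cast; ring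
    rw [PySem.List.slice_natCast_add, hcast]
    rw [ih (i + n') (by omega) f (by omega)]
    simp [strideChunks]

theorem chunksRef_shift (chars : List Char) (n' : Nat) (hn : 1 ≤ n') :
    ∀ (j i : Nat), 0 < i →
    chunksRef chars n' (i + j * n')
      = (strideChunks chars n' i j).reverse ++ chunksRef chars n' i := by
  intro j
  induction j with
  | zero => intro i _; simp [strideChunks]
  | succ j ih =>
    intro i hi
    have h : i + (j + 1) * n' = (i + n') + j * n' := by ring
    rw [h, ih (i + n') (by omega)]
    have h0 : ¬ (i + n' = 0) := by omega
    have h1 : ¬ (i + n' ≤ n') := by omega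
    have h2 : i + n' - max n' 1 = i := by omega
    have h3 : i + n' - n' = i := by omega
    rw [chunksRef]
    simp only [dif_neg h0, dif_neg h1, h2, h3]
    simp [strideChunks]

theorem chunksRef_small (chars : List Char) (n' : Nat) (i : Nat) (h0 : ¬ i = 0)
    (h1 : i ≤ n') : chunksRef chars n' i = [String.ofList (chars.take i)] := by
  rw [chunksRef]; simp [h0, h1]

theorem chunksRef_mul (chars : List Char) (n' : Nat) (hn : 1 ≤ n') :
    ∀ (j : Nat), chunksRef chars n' (j * n') = (strideChunks chars n' 0 j).reverse := by
  intro j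
  cases j with
  | zero => rw [chunksRef]; simp [strideChunks]
  | succ j =>
    have h : (j + 1) * n' = n' + j * n' := by ring
    rw [h, chunksRef_shift chars n' hn j n' (by omega)]
    rw [chunksRef_small chars n' n' (by omega) le_rfl]
    simp [strideChunks]

-- ===== VERDICT (by name: the statement is the Claim_ definition above) =====
theorem chunk_at_end_spec : Claim_equal_chunk_at_end := by
  intro value n _hdom hpre
  unfold Spec_chunk_at_end chunk_at_end chunk_at_end_alt
  by_cases hemp : value.toList = []
  · -- empty string: A's loop exits at start = -n ≤ 0 and the trailing if fails; B returns []
    have hn0 : ¬ n < 0 := by rcases hpre with h | ⟨_, h⟩ <;> omega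
    rw [hemp]
    simp [chunkA_loop, hn0]
  · -- non-empty: both sides equal chunksRef value.toList n.toNat (value.toList.length)
    have hn : 1 ≤ n := by
      rcases hpre with h | ⟨h, _⟩
      · exact h
      · exact absurd (by rw [h]; rfl) hemp
    set chars := value.toList with hchars
    obtain ⟨n', rfl⟩ : ∃ n' : Nat, n = (n' : Int) := ⟨n.toNat, by omega⟩
    have hn' : 1 ≤ n' := by exact_mod_cast hn
    set L := chars.length with hL
    have hA := chunkA_loop_spec chars n' hn' L (L + 1) (Nat.lt_succ_self L) []
    simp only [List.nil_append] at hA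
    rw [hA]
    -- B side
    have hempb : ¬ chars.isEmpty := by simpa [List.isEmpty_iff] using hemp
    simp only [hempb, Bool.false_eq_true, if_false]
    rw [PySem.Int.mod_natCast L n']
    have hdecomp : L % n' + (L / n') * n' = L := Nat.mod_add_div' L n'
    have hfuel : L / n' ≤ L + 1 := by
      have := Nat.div_le_self L n'; omega
    by_cases hr : L % n' = 0
    · have hmul : L / n' * n' = L := by simpa [hr] using hdecomp
      have hB := chunkB_loop_spec chars n' hn' (L / n') 0 (by simpa using hmul) (L + 1) hfuel []
      simp only [Nat.cast_zero] at hB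
      simp only [hr, Nat.cast_zero, ne_eq, not_true_eq_false, if_false]
      rw [hB]
      conv_lhs => rw [show L = L / n' * n' from hmul.symm, chunksRef_mul chars n' hn']
      simp
    · have hrne : ¬ ((L % n' : Nat) : Int) = 0 := by exact_mod_cast hr
      simp only [ne_eq, hrne, not_false_eq_true, if_pos]
      have hB := chunkB_loop_spec chars n' hn' (L / n') (L % n') hdecomp (L + 1) hfuel
        [String.ofList (PySem.List.slice chars none (some ((L % n' : Nat) : Int)))]
      rw [hB, PySem.List.slice_to_natCast]
      conv_lhs => rw [show L = L % n' + L / n' * n' from hdecomp.symm,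
        chunksRef_shift chars n' hn' (L / n') (L % n') (Nat.pos_of_ne_zero hr)]
      rw [chunksRef_small chars n' (L % n') hr (le_of_lt (Nat.mod_lt L (by omega)))]
      simp
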